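-- pv_equiv track=rewrite | github.com/gordonkratz/Project-Euler | Project Euler/75-100/79_PasscodeDerivation.py | TryInsert
-- ===== SOURCE A (Python) =====
-- def TryInsert(working, source):
--     for i in range(len(working) -1):
--         left = working[i]
--         right = working[i+1]
--         for line in source:
--             for j in range(len(line) - 2):
--                 if(line[j] == left and line[j+2] == right):
--                     return working[0:i+1] + line[j+1] + working[i+1:]
-- ===== SOURCE B (Python) =====
-- def TryInsert(working, source):
--     # index each adjacent pair (left, right) -> middle char of its FIRST occurrence
--     index = {}
--     for line in source:
--         for l, m, r in zip(line, line[1:], line[2:]):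
--             index.setdefault((l, r), m)
--     prefix = ""
--     rest = working
--     while len(rest) >= 2:
--         key = (rest[0], rest[1])
--         if key in index:
--             return prefix + rest[0] + index[key] + rest[1:]
--         prefix += rest[0]
--         rest = rest[1:]
-- ===== Notes on version B (the rewrite author's own statement) =====
-- stated objective: faster
-- what changed: B builds a dict indexing each adjacent (left,right) pair of the source to the middle char of its first occurrence once, then makes a single structural pass over working, instead of A's rescan of the whole source for every adjacent pair of working.
import Mathlib
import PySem

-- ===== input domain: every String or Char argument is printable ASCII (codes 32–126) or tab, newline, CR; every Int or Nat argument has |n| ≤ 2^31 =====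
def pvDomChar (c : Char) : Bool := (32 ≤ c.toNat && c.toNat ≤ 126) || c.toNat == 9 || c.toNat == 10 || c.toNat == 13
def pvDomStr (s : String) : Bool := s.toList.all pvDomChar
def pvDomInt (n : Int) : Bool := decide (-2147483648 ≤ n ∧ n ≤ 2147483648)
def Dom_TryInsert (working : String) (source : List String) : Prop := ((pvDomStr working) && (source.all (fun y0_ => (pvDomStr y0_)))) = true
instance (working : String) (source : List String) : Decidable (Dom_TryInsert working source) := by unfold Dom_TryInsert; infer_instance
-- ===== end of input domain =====

-- B replaces A's nested rescans of `source` for every adjacent pair by one precomputed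
-- first-occurrence pair index plus a single structural pass over `working` (objective: faster).

-- ===== PORT A =====
-- literal port of A: for i in range(len(working)-1): for line in source: for j in range(len(line)-2): …
-- (every index read is in range, so List.getD is exact here)
def TryInsert (working : String) (source : List String) : Option String :=
  let w := working.toList
  (List.range (w.length - 1)).findSome? fun i =>
    let left := w.getD i ' '
    let right := w.getD (i + 1) ' '
    source.findSome? fun line =>
      let l := line.toList
      (List.range (l.length - 2)).findSome? fun j =>
        if l.getD j ' ' == left && l.getD (j + 2) ' ' == right then
          some (String.ofList (w.take (i + 1) ++ l.getD (j + 1) ' ' :: w.drop (i + 1)))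
        else none

-- ===== PORT B =====
-- index = {}; for line in source: for (l, m, r) in zip(line, line[1:], line[2:]): index.setdefault((l, r), m)
def pvBuildIndex (source : List String) : PySem.Dict (Char × Char) Char :=
  source.foldl
    (fun d line =>
      let l := line.toList
      (l.zip ((l.drop 1).zip (l.drop 2))).foldl
        (fun d t => d.setdefault (t.1, t.2.2) t.2.1) d)
    PySem.Dict.empty

-- prefix = ""; rest = working; while len(rest) >= 2: …; prefix += rest[0]; rest = rest[1:]
def pvScan (idx : PySem.Dict (Char × Char) Char) (prefix_ : List Char) : List Char → Option String
  | a :: b :: rest =>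
      match idx.get? (a, b) with
      | some m => some (String.ofList (prefix_ ++ a :: m :: b :: rest))
      | none => pvScan idx (prefix_ ++ [a]) (b :: rest)
  | _ => none

def TryInsert_alt (working : String) (source : List String) : Option String :=
  pvScan (pvBuildIndex source) [] working.toList

-- ===== PRECONDITION & SPEC =====
def Spec_TryInsert (working : String) (source : List String) (out : Option String) : Prop := out = TryInsert_alt working source
instance (working : String) (source : List String) (out : Option String) : Decidable (Spec_TryInsert working source out) := by unfold Spec_TryInsert; infer_instance

-- ===== CLAIM (what is proved, stated in full; the proofs are below) =====
def Claim_equal_TryInsert : Prop := ∀ (working : String) (source : List String), Dom_TryInsert working source → Spec_TryInsert working source (TryInsert working source)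

-- ===== LEMMAS AND PROOFS =====

-- canonical structural scan of one line for the pair (L, R), returning the middle char
def pvScan3 (L R : Char) : List Char → Option Char
  | a :: b :: c :: t => if a == L && c == R then some b else pvScan3 L R (b :: c :: t)
  | _ => none

lemma findSome?_option_map {α β γ : Type} (l : List α) (f : α → Option β) (g : β → γ) :
    l.findSome? (fun x => (f x).map g) = (l.findSome? f).map g := by
  induction l with
  | nil => rfl
  | cons x xs ih =>
      simp only [List.findSome?_cons]
      cases f x <;> simp [ih]

lemma findSome?_range_succ {β : Type} (f : ℕ → Option β) (n : ℕ) (h0 : f 0 = none) :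
    List.findSome? f (List.range (n + 1)) = List.findSome? (fun j => f (j + 1)) (List.range n) := by
  rw [List.range_succ_eq_map, List.findSome?_cons, h0, List.findSome?_map]
  rfl

-- A's indexed inner loop over one line equals the structural scan
lemma idxScan_eq_scan3 (L R : Char) (l : List Char) :
    (List.range (l.length - 2)).findSome? (fun j =>
      if l.getD j ' ' == L && l.getD (j + 2) ' ' == R then some (l.getD (j + 1) ' ') else none)
      = pvScan3 L R l := by
  fun_induction pvScan3 L R l with
  | case1 a b c t h =>
      have hl : (a :: b :: c :: t).length - 2 = t.length + 1 := by simp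
      rw [hl, List.range_succ_eq_map, List.findSome?_cons]
      simp [h]
  | case2 a b c t h ih =>
      have hl : (a :: b :: c :: t).length - 2 = t.length + 1 := by simp
      have hl' : (b :: c :: t).length - 2 = t.length := by simp
      rw [hl'] at ih
      rw [hl, findSome?_range_succ _ _ (by simp [h]), ← ih]
      first
      | rfl
      | (congr 1
         funext j
         simp [List.getD_cons_succ])
  | case3 l h =>
      match l, h with
      | [], _ => rfl
      | [a], _ => rfl
      | [a, b], _ => rfl
      | a :: b :: c :: t, h => exact (h a b c t rfl).elim

-- B's triple-zip setdefault loop over one line, lookup characterization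
lemma get?_foldl_setdefault (k : Char × Char) (ts : List (Char × Char × Char))
    (d : PySem.Dict (Char × Char) Char) :
    (ts.foldl (fun d t => d.setdefault (t.1, t.2.2) t.2.1) d).get? k
      = ((d.get? k).orElse (fun _ => ts.findSome? fun t =>
          if (t.1, t.2.2) == k then some t.2.1 else none)) := by
  induction ts generalizing d with
  | nil => cases h : d.get? k <;> simp [h, Option.orElse]
  | cons t ts ih =>
      simp only [List.foldl_cons, List.findSome?_cons, ih]
      by_cases hc : d.contains (t.1, t.2.2) = true
      · have hd : d.setdefault (t.1, t.2.2) t.2.1 = d := by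
          simp [PySem.Dict.setdefault, hc]
        rw [hd]
        by_cases hk : ((t.1, t.2.2) == k) = true
        · have hk' : (t.1, t.2.2) = k := eq_of_beq hk
          have hs : (d.get? k).isSome := by
            rw [← hk', ← PySem.Dict.contains_eq_isSome_get?]; exact hc
          obtain ⟨v, hv⟩ := Option.isSome_iff_exists.mp hs
          simp [hv, hk, Option.orElse]
        · simp [hk]
      · have hcf : d.contains (t.1, t.2.2) = false := Bool.eq_false_iff.mpr hc
        have hd : d.setdefault (t.1, t.2.2) t.2.1 = d.insert (t.1, t.2.2) t.2.1 := by
          apply PySem.Dict.ext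
          rw [PySem.Dict.items_insert_of_not_contains]
          · simp [PySem.Dict.setdefault, hc]
          · exact hcf
        rw [hd, PySem.Dict.get?_insert]
        by_cases hk : k = (t.1, t.2.2)
        · have hnone : d.get? k = none := by
            rw [hk]
            cases h : d.get? (t.1, t.2.2) with
            | none => rfl
            | some v =>
                exact absurd (by rw [PySem.Dict.contains_eq_isSome_get?, h]; rfl) hc
          have hk2 : ((t.1, t.2.2) == k) = true := beq_iff_eq.mpr hk.symm
          rw [show (t.1, t.2.2) = k from hk.symm, hnone]
          simp [hk]
        · have hk' : ((t.1, t.2.2) == k) = false := by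
            simp only [beq_eq_false_iff_ne, ne_eq]
            exact fun h => hk h.symm
          simp [hk, hk']

-- the triple-zip key search is the structural scan
lemma zipFind_eq_scan3 (L R : Char) (l : List Char) :
    ((l.zip ((l.drop 1).zip (l.drop 2))).findSome? fun t =>
        if (t.1, t.2.2) == (L, R) then some t.2.1 else none)
      = pvScan3 L R l := by
  fun_induction pvScan3 L R l with
  | case1 a b c t h =>
      simp only [List.drop_succ_cons, List.drop_zero,
        List.zip_cons_cons, List.findSome?_cons]
      rw [show (((a, (b, c)).1, (a, (b, c)).2.2) == (L, R)) = (a == L && c == R) from rfl]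
      simp [h]
  | case2 a b c t h ih =>
      simp only [List.drop_succ_cons, List.drop_zero,
        List.zip_cons_cons, List.findSome?_cons]
      rw [show (((a, (b, c)).1, (a, (b, c)).2.2) == (L, R)) = (a == L && c == R) from rfl]
      rw [if_neg h]
      simp only
      rw [← ih]
      simp
  | case3 l h =>
      match l, h with
      | [], _ => rfl
      | [a], _ => rfl
      | [a, b], _ => rfl
      | a :: b :: c :: t, h => exact (h a b c t rfl).elim

-- the full index lookup equals the nested source scan
lemma get?_buildIndex (L R : Char) (source : List String) :
    (pvBuildIndex source).get? (L, R)
      = source.findSome? (fun line => pvScan3 L R line.toList) := by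
  unfold pvBuildIndex
  suffices h : ∀ d : PySem.Dict (Char × Char) Char,
      (source.foldl (fun d line =>
        (line.toList.zip ((line.toList.drop 1).zip (line.toList.drop 2))).foldl
          (fun d t => d.setdefault (t.1, t.2.2) t.2.1) d) d).get? (L, R)
      = (d.get? (L, R)).orElse (fun _ => source.findSome? (fun line => pvScan3 L R line.toList)) by
    rw [h PySem.Dict.empty]; simp [Option.orElse]
  induction source with
  | nil => intro d; cases h : d.get? (L, R) <;> simp [h, Option.orElse]
  | cons line rest ih =>
      intro d
      simp only [List.foldl_cons, List.findSome?_cons, ih, get?_foldl_setdefault,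
        zipFind_eq_scan3]
      cases h1 : d.get? (L, R) <;> cases h2 : pvScan3 L R line.toList <;>
        simp [Option.orElse]

-- A's outer indexed loop equals B's structural scan, with prefix accumulator
lemma outer_eq_scan (idx : PySem.Dict (Char × Char) Char) (acc l : List Char) :
    (List.range (l.length - 1)).findSome? (fun i =>
      (idx.get? (l.getD i ' ', l.getD (i + 1) ' ')).map
        (fun m => String.ofList (acc ++ (l.take (i + 1) ++ m :: l.drop (i + 1)))))
    = pvScan idx acc l := by
  fun_induction pvScan idx acc l with
  | case1 acc a b rest m hm =>
      have hl : (a :: b :: rest).length - 1 = rest.length + 1 := by simp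
      rw [hl, List.range_succ_eq_map, List.findSome?_cons]
      simp [hm]
  | case2 acc a b rest hm ih =>
      have hl : (a :: b :: rest).length - 1 = rest.length + 1 := by simp
      have hl' : (b :: rest).length - 1 = rest.length := by simp
      rw [hl'] at ih
      rw [hl, findSome?_range_succ _ _ (by simp [hm]), ← ih]
      congr 1
      funext i
      simp [List.take_succ_cons, List.drop_succ_cons, List.append_assoc]
  | case3 l p h =>
      match l, h with
      | [], _ => rfl
      | [a], _ => rfl
      | a :: b :: rest, h => exact (h a b rest rfl).elim

-- ===== VERDICT (by name: the statement is the Claim_ definition above) =====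
theorem TryInsert_spec : Claim_equal_TryInsert := by
  intro working source _
  unfold Spec_TryInsert TryInsert TryInsert_alt
  simp only
  rw [← outer_eq_scan (pvBuildIndex source) [] working.toList]
  congr 1
  funext i
  rw [show (fun line : String =>
        (List.range (line.toList.length - 2)).findSome? fun j =>
          if line.toList.getD j ' ' == working.toList.getD i ' ' &&
             line.toList.getD (j + 2) ' ' == working.toList.getD (i + 1) ' ' then
            some (String.ofList (working.toList.take (i + 1) ++
              line.toList.getD (j + 1) ' ' :: working.toList.drop (i + 1)))
          else none)
      = (fun line : String =>
          (pvScan3 (working.toList.getD i ' ') (working.toList.getD (i + 1) ' ') line.toList).map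
            (fun m => String.ofList (working.toList.take (i + 1) ++ m :: working.toList.drop (i + 1))))
      from funext fun line => by
        rw [← idxScan_eq_scan3, ← findSome?_option_map]
        congr 1
        funext j
        split <;> simp]
  rw [findSome?_option_map, get?_buildIndex]
  simp
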